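-- pv_equiv track=rewrite | github.com/k-yamasaki-zakisan/competition-programming-contest | LeetCode/2610 Convert an Array Into a 2D Array With Conditions.py | findMatrix
-- ===== SOURCE A (Python) =====
-- from typing import List
-- from collections import Counter
--
-- def findMatrix(nums: List[int]) -> List[List[int]]:
--     count_nums = Counter(nums)
--     max_count = max(count_nums.values())
--     ans = [[] for _ in range(max_count)]
--     for num, cnt in count_nums.items():
--         for i in range(cnt):
--             ans[i].append(num)
--     return ans
-- ===== SOURCE B (Python) =====
-- from typing import List
-- from collections import Counter
--
-- def findMatrix(nums: List[int]) -> List[List[int]]: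
--     count_nums = Counter(nums)
--     max_count = max(count_nums.values())
--     return [[num for num, cnt in count_nums.items() if cnt > i]
--             for i in range(max_count)]
-- ===== Notes on version B (the rewrite author's own statement) =====
-- stated objective: alternative
-- what changed: Instead of scattering each number across its first cnt rows (push over numbers, mutating a preallocated row array), B builds each row directly by a pull: row i collects all numbers whose count exceeds i, in Counter order.
import Mathlib
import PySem

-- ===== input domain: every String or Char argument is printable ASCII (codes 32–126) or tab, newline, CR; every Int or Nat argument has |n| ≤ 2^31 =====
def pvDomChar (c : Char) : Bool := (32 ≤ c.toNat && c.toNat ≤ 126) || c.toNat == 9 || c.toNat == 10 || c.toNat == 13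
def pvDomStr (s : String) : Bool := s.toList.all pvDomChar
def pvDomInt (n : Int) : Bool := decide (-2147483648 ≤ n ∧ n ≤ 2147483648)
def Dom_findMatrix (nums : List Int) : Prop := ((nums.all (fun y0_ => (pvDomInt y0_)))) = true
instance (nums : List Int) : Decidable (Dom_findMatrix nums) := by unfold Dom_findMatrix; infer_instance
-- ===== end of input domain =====

-- B builds each row directly (row i = numbers with count > i, in Counter order) instead of
-- A's push of every number onto its first cnt rows; alternative decomposition, same cost.


-- ===== PORT A =====
-- for num, cnt in count_nums.items(): for i in range(cnt): ans[i].append(num)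
def pushRows (ans : List (List Int)) (p : Int × Int) : List (List Int) :=
  (PySem.List.pyRange 0 p.2).foldl
    (fun a i => a.set i.toNat ((a.getD i.toNat []) ++ [p.1])) ans

def findMatrix (nums : List Int) : List (List Int) :=
  let count_nums := PySem.Dict.counter nums
  match PySem.List.max? count_nums.values (fun v => v) with
  | none => []  -- Python raises ValueError (max of empty); excluded by Pre_
  | some max_count =>
    let ans := (PySem.List.pyRange 0 max_count).map (fun _ => ([] : List Int))
    count_nums.items.foldl pushRows ans

-- ===== PORT B =====
def findMatrix_alt (nums : List Int) : List (List Int) :=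
  let count_nums := PySem.Dict.counter nums
  match PySem.List.max? count_nums.values (fun v => v) with
  | none => []  -- Python raises ValueError (max of empty); excluded by Pre_
  | some max_count =>
    (PySem.List.pyRange 0 max_count).map
      (fun i => (count_nums.items.filter (fun p => p.2 > i)).map (fun p => p.1))

-- ===== PRECONDITION & SPEC =====
-- Pre_ excludes only the empty list, on which both Pythons raise ValueError (max of empty sequence).
def Pre_findMatrix (nums : List Int) : Prop := nums ≠ []
instance (nums : List Int) : Decidable (Pre_findMatrix nums) := by unfold Pre_findMatrix; infer_instance
def pvWitness_findMatrix : List Int := [1, 3, 4, 1, 2, 3, 1]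
def Spec_findMatrix (nums : List Int) (out : List (List Int)) : Prop := out = findMatrix_alt nums
instance (nums : List Int) (out : List (List Int)) : Decidable (Spec_findMatrix nums out) := by unfold Spec_findMatrix; infer_instance

-- ===== CLAIM (what is proved, stated in full; the proofs are below) =====
def Claim_equal_findMatrix : Prop := ∀ (nums : List Int), Dom_findMatrix nums → Pre_findMatrix nums → Spec_findMatrix nums (findMatrix nums)

-- ===== LEMMAS AND PROOFS =====

-- Nat form of A's inner loop
def pushN (a : List (List Int)) (num : Int) (n : Nat) : List (List Int) :=
  (List.range n).foldl (fun a j => a.set j ((a.getD j []) ++ [num])) a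

theorem pushRows_eq_pushN (a : List (List Int)) (num cnt : Int) (h : 0 ≤ cnt) :
    pushRows a (num, cnt) = pushN a num cnt.toNat := by
  unfold pushRows pushN
  rw [show cnt = ((cnt.toNat : Nat) : Int) by omega, PySem.List.pyRange_zero_natCast]
  rw [List.foldl_map]
  have : (max cnt 0).toNat = cnt.toNat := by omega
  simp [this]

theorem pushN_length (a : List (List Int)) (num : Int) (n : Nat) :
    (pushN a num n).length = a.length := by
  induction n with
  | zero => rfl
  | succ k ih => unfold pushN; rw [List.range_succ, List.foldl_append]; simpa [pushN] using ih

theorem pushN_getElem? (a : List (List Int)) (num : Int) (n : Nat) (hn : n ≤ a.length)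
    (i : Nat) :
    (pushN a num n)[i]? = if i < n then (a[i]?.map (· ++ [num])) else a[i]? := by
  induction n with
  | zero => simp [pushN]
  | succ k ih =>
    have ih' := ih (by omega)
    have hlen : (pushN a num k).length = a.length := pushN_length a num k
    unfold pushN
    rw [List.range_succ, List.foldl_append]
    simp only [List.foldl_cons, List.foldl_nil]
    rw [show (List.range k).foldl (fun a j => a.set j ((a.getD j []) ++ [num])) a = pushN a num k from rfl]
    rw [List.getElem?_set]
    by_cases hik : k = i
    · subst hik
      have hik2 : (pushN a num k)[k]? = a[k]? := by rw [ih']; simp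
      have hk : k < a.length := by omega
      rw [if_pos rfl, if_pos (by omega), if_pos (by omega : k < k + 1)]
      rw [List.getD_eq_getElem?_getD, hik2]
      rcases List.getElem?_eq_some_iff.mpr ⟨hk, rfl⟩ with h
      rw [List.getElem?_eq_getElem hk]
      simp
    · rw [if_neg hik, ih']
      by_cases h1 : i < k
      · rw [if_pos h1, if_pos (by omega)]
      · rw [if_neg h1, if_neg (by omega)]

theorem foldl_pushRows_getElem? (L : List (Int × Int)) (a : List (List Int))
    (hL : ∀ p ∈ L, 0 ≤ p.2 ∧ p.2.toNat ≤ a.length) (i : Nat) :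
    (L.foldl pushRows a)[i]? =
      a[i]?.map (fun r => r ++ (L.filter (fun p => p.2 > (i : Int))).map (fun p => p.1)) := by
  induction L generalizing a with
  | nil => simp
  | cons p L ih =>
    have hp := hL p (List.mem_cons_self)
    simp only [List.foldl_cons]
    rw [show pushRows a p = pushN a p.1 p.2.toNat from pushRows_eq_pushN a p.1 p.2 hp.1]
    have hlen : (pushN a p.1 p.2.toNat).length = a.length := pushN_length a p.1 p.2.toNat
    rw [ih _ (fun q hq => by
      have := hL q (List.mem_cons_of_mem _ hq); exact ⟨this.1, by omega⟩)]
    rw [pushN_getElem? a p.1 p.2.toNat hp.2 i]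
    by_cases hc : (i : Int) < p.2
    · have hnc : i < p.2.toNat := by omega
      rw [if_pos hnc]
      simp only [List.filter_cons, decide_eq_true_eq]
      rw [if_pos (by exact_mod_cast hc)]
      cases a[i]? with
      | none => rfl
      | some r => simp
    · have hnc : ¬ i < p.2.toNat := by omega
      rw [if_neg hnc]
      simp only [List.filter_cons, decide_eq_true_eq]
      rw [if_neg (by exact_mod_cast hc)]

theorem findMatrix_spec : Claim_equal_findMatrix := by
  intro nums _ hpre
  unfold Spec_findMatrix findMatrix findMatrix_alt
  simp only []
  set c := PySem.Dict.counter nums with hc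
  cases hmax : PySem.List.max? c.values (fun v => v) with
  | none =>
    exfalso
    rw [PySem.List.max?_eq_none_iff] at hmax
    have hitems : c.items = (PySem.Set.ofList nums).map (fun k => (k, (nums.count k : Int))) :=
      PySem.Dict.items_counter nums
    have : c.values = c.items.map (fun p => p.2) := rfl
    rw [this, hitems] at hmax
    simp only [List.map_eq_nil_iff] at hmax
    cases nums with
    | nil => exact hpre rfl
    | cons x t =>
      have : x ∈ PySem.Set.ofList (x :: t) := by
        rw [PySem.Set.mem_ofList]; exact List.mem_cons_self
      rw [hmax] at this
      exact absurd this (List.not_mem_nil)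
  | some m =>
    dsimp only
    have hitems : c.items = (PySem.Set.ofList nums).map (fun k => (k, (nums.count k : Int))) :=
      PySem.Dict.items_counter nums
    have hvals : c.values = c.items.map (fun p => p.2) := rfl
    -- every count is positive and at most m
    have hbound : ∀ p ∈ c.items, 0 ≤ p.2 ∧ p.2 ≤ m := by
      intro p hp
      have hle : p.2 ≤ m := by
        have := PySem.List.max?_isMax hmax p.2 (by
          rw [hvals]; exact List.mem_map_of_mem hp)
        exact this
      refine ⟨?_, hle⟩
      rw [hitems] at hp
      rcases List.mem_map.mp hp with ⟨k, _, rfl⟩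
      positivity
    have hm : 0 < m := by
      have hmem := PySem.List.max?_mem hmax
      rw [hvals, hitems] at hmem
      rcases List.mem_map.mp hmem with ⟨p, hp, rfl⟩
      rcases List.mem_map.mp hp with ⟨k, hk, rfl⟩
      rw [PySem.Set.mem_ofList] at hk
      have : 0 < nums.count k := List.count_pos_iff.mpr hk
      simp only []
      exact_mod_cast this
    -- initial rows
    have hmcast : m = ((m.toNat : Nat) : Int) := by omega
    rw [hmcast, PySem.List.pyRange_zero_natCast]
    set N := m.toNat with hN
    have hinit : ∀ i : Nat, ((List.map (fun k => ((k : Nat) : Int)) (List.range N)).map (fun _ => ([] : List Int)))[i]? = if i < N then some ([] : List Int) else none := by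
      intro i
      by_cases hi : i < N
      · rw [List.getElem?_eq_getElem (by simpa using hi)]
        simp [hi]
      · rw [List.getElem?_eq_none (by simpa using Nat.le_of_not_lt hi)]
        simp [hi]
    apply List.ext_getElem?
    intro i
    rw [foldl_pushRows_getElem? _ _ (fun p hp => by
      have := hbound p hp
      refine ⟨this.1, ?_⟩
      simp only [List.length_map, List.length_range]
      omega)]
    rw [hinit i]
    rw [List.map_map, List.getElem?_map]
    by_cases hi : i < N
    · rw [List.getElem?_eq_getElem (by simpa using hi)]
      simp only [if_pos hi, Option.map_some, Function.comp_apply, List.getElem_range,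
        List.nil_append]
    · rw [List.getElem?_eq_none (by simpa using Nat.le_of_not_lt hi)]
      simp [hi]
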